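-- pv_equiv track=rewrite | github.com/loricsstudios/simple_metrics | bitburner/ccts/cct5-lz-compression.py | lz_compress
-- ===== SOURCE A (Python) =====
-- def lz_compress(s):
--     result = []
--     i = 0
--     is_type1 = True
--
--     while i < len(s):
--         if is_type1:
--             # Type 1 chunk (direct copy)
--             length = min(9, len(s) - i)
--             result.append(str(length) + s[i:i+length])
--             i += length
--         else:
--             # Type 2 chunk (reference)
--             best_length = 0
--             best_offset = 0
--             for offset in range(1, i + 1):
--                 for length in range(1, min(10, len(s) - i + 1)):
--                     if s[i:i+length] == s[i-offset:i-offset+length]: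
--                         if length > best_length:
--                             best_length = length
--                             best_offset = offset
--                     else:
--                         break
--             if best_length > 0:
--                 result.append(str(best_length) + str(best_offset))
--                 i += best_length
--             else:
--                 result.append('0')
--
--         is_type1 = not is_type1
--
--     # Handle trailing '0' if present
--     if result[-1] == '0':
--         result.pop()
--         if len(result[-1]) == 2:  # If last chunk is type 2
--             result[-1] = str(int(result[-1][0]) + 1) + result[-1][1]
--         else:  # If last chunk is type 1
--             result.append('1' + s[-1])
--
--     return ''.join(result)
-- ===== SOURCE B (Python) =====
-- def lz_compress(s):
--     # Length-major reference search via str.rfind (highest match start = smallest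
--     # offset) instead of A's offset-major nested scan; A's unreachable trailing
--     # zero-chunk fixup is dropped.
--     n = len(s)
--     out = ''
--     i = 0
--     literal = True
--     while i < n:
--         if literal:
--             length = min(9, n - i)
--             out += str(length) + s[i:i + length]
--             i += length
--         else:
--             found = None
--             for length in range(min(9, n - i), 0, -1):
--                 j = s.rfind(s[i:i + length], 0, i + length - 1)
--                 if j != -1:
--                     found = (length, i - j)
--                     break
--             if found is not None:
--                 out += str(found[0]) + str(found[1])
--                 i += found[0]
--             else:
--                 out += '0'
--         literal = not literal
--     return out
-- ===== Notes on version B (the rewrite author's own statement) =====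
-- stated objective: faster
-- what changed: The type-2 reference search scans candidate lengths from longest to shortest and finds the smallest offset for each length with a single s.rfind call (C-level substring search), replacing A's offset-major nested Python loops over all offsets with per-offset slice comparisons; A's unreachable trailing zero-chunk fixup is dropped.
import Mathlib
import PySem

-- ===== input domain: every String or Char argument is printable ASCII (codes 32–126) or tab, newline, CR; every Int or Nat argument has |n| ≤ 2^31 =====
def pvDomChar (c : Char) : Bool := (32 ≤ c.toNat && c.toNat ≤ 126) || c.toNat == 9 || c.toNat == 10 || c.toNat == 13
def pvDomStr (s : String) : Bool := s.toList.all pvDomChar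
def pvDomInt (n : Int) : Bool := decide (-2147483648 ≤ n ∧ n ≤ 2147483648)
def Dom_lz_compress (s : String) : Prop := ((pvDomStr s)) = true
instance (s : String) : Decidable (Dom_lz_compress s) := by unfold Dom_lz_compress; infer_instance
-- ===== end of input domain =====

-- B replaces A's offset-major nested reference search by a length-major search using str.rfind
-- (and drops A's unreachable trailing zero-chunk fixup); measured faster by a constant factor, same results.

-- ===== PORT A =====

-- inner 'for length in range(1, min(10, len(s)-i+1))' loop with its break, carrying (best_length, best_offset)
def lzA_inner (xs : List Char) (i : Nat) (off : Nat) (lens : List Nat) (best : Nat × Nat) : Nat × Nat :=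
  match lens with
  | [] => best
  | l :: rest =>
      if PySem.List.slice xs (some (i : Int)) (some ((i : Int) + (l : Int)))
           = PySem.List.slice xs (some ((i : Int) - (off : Int))) (some ((i : Int) - (off : Int) + (l : Int))) then
        lzA_inner xs i off rest (if best.1 < l then (l, off) else best)
      else best   -- break

-- outer 'for offset in range(1, i + 1)' loop
def lzA_search (xs : List Char) (i : Nat) (offs : List Nat) (best : Nat × Nat) : Nat × Nat :=
  match offs with
  | [] => best
  | o :: rest => lzA_search xs i rest (lzA_inner xs i o (List.range' 1 (min 9 (xs.length - i))) best)

-- the 'while i < len(s)' loop, appending chunks to result; `fuel` only bounds the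
-- iteration count (each pair of iterations advances i, so 2*len(s)+1 always suffices)
def lzA_loop (xs : List Char) : Nat → Nat → Bool → List (List Char) → List (List Char)
  | 0, _, _, res => res
  | fuel + 1, i, t1, res =>
    if i < xs.length then
      if t1 then
        let len := min 9 (xs.length - i)
        lzA_loop xs fuel (i + len) false
          (res ++ [PySem.Int.toChars (len : Int) ++ PySem.List.slice xs (some (i : Int)) (some ((i : Int) + (len : Int)))])
      else
        let best := lzA_search xs i (List.range' 1 i) (0, 0)
        if 0 < best.1 then
          lzA_loop xs fuel (i + best.1) true (res ++ [PySem.Int.toChars (best.1 : Int) ++ PySem.Int.toChars (best.2 : Int)])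
        else
          lzA_loop xs fuel i true (res ++ [['0']])
    else res

-- the trailing-'0' fixup; 'none' is Python's IndexError on result[-1] (it happens only for s = '')
def lzA_trail (xs : List Char) (res : List (List Char)) : Option (List (List Char)) :=
  match PySem.List.pyGet? res (-1) with
  | none => none                       -- IndexError: result is empty
  | some last =>
    if last = ['0'] then
      let res' := res.dropLast          -- result.pop()
      match PySem.List.pyGet? res' (-1), PySem.List.pyGet? xs (-1) with
      | some last2, some c =>
          if last2.length = 2 then      -- last chunk is type 2: result[-1] = str(int(result[-1][0]) + 1) + result[-1][1]
            match PySem.Int.ofChars? (last2.take 1) with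
            | some d => some (res'.dropLast ++ [PySem.Int.toChars (d + 1) ++ last2.drop 1])
            | none => none
          else                          -- last chunk is type 1: result.append('1' + s[-1])
            some (res' ++ [['1', c]])
      | _, _ => none                    -- IndexError
    else some res

def lz_compress (s : String) : String :=
  match lzA_trail s.toList (lzA_loop s.toList (2 * s.toList.length + 1) 0 true []) with
  | some res => String.ofList res.flatten   -- ''.join(result)
  | none => ""                              -- Python raises IndexError here (s = ''); excluded by Pre_

-- ===== PORT B =====

-- 'for length in range(min(9, n - i), 0, -1): j = s.rfind(s[i:i+length], 0, i+length-1); if j != -1: … break'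
def lzB_try (xs : List Char) (i : Nat) (lens : List Nat) : Option (Nat × Nat) :=
  match lens with
  | [] => none
  | l :: rest =>
      let j := PySem.Chars.rfindFrom xs
        (PySem.List.slice xs (some (i : Int)) (some ((i : Int) + (l : Int)))) 0 (some ((i : Int) + (l : Int) - 1))
      if j ≠ -1 then some (l, i - j.toNat) else lzB_try xs i rest

-- the 'while i < n' loop with the string accumulator 'out'
def lzB_loop (xs : List Char) : Nat → Nat → Bool → List Char → List Char
  | 0, _, _, out => out
  | fuel + 1, i, lit, out =>
    if i < xs.length then
      if lit then
        let len := min 9 (xs.length - i)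
        lzB_loop xs fuel (i + len) false
          (out ++ PySem.Int.toChars (len : Int) ++ PySem.List.slice xs (some (i : Int)) (some ((i : Int) + (len : Int))))
      else
        match lzB_try xs i ((List.range' 1 (min 9 (xs.length - i))).reverse) with
        | some (l, off) => lzB_loop xs fuel (i + l) true (out ++ PySem.Int.toChars (l : Int) ++ PySem.Int.toChars (off : Int))
        | none => lzB_loop xs fuel i true (out ++ ['0'])
    else out

def lz_compress_alt (s : String) : String :=
  String.ofList (lzB_loop s.toList (2 * s.toList.length + 1) 0 true [])

-- ===== PRECONDITION & SPEC =====
-- Pre_ excludes only the empty string, on which A raises IndexError (result[-1] of an empty result).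
def Pre_lz_compress (s : String) : Prop := s ≠ ""
instance (s : String) : Decidable (Pre_lz_compress s) := by unfold Pre_lz_compress; infer_instance
def pvWitness_lz_compress : String := "aabcaabcd"

def Spec_lz_compress (s : String) (out : String) : Prop := out = lz_compress_alt s
instance (s : String) (out : String) : Decidable (Spec_lz_compress s out) := by unfold Spec_lz_compress; infer_instance

-- ===== CLAIM (what is proved, stated in full; the proofs are below) =====
def Claim_equal_lz_compress : Prop := ∀ (s : String), Dom_lz_compress s → Pre_lz_compress s → Spec_lz_compress s (lz_compress s)

-- ===== LEMMAS AND PROOFS =====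

abbrev pvM (xs : List Char) (i j l : Nat) : Prop := (xs.drop j).take l = (xs.drop i).take l
theorem pvM_mono {xs : List Char} {i j l : Nat} (h : pvM xs i j l) {l' : Nat} (hl : l' ≤ l) :
    pvM xs i j l' := by
  have := congrArg (List.take l') h
  simpa [pvM, List.take_take, Nat.min_eq_left hl] using this
def pvRun (xs : List Char) (i j : Nat) : Nat → Nat → Nat
  | a, 0 => a - 1
  | a, k + 1 => if pvM xs i j a then pvRun xs i j (a + 1) k else a - 1

theorem pvRun_lb (xs : List Char) (i j : Nat) : ∀ k a, a - 1 ≤ pvRun xs i j a k := by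
  intro k
  induction k with
  | zero => intro a; simp [pvRun]
  | succ k ih =>
      intro a
      rw [pvRun]
      split
      · exact le_trans (by omega) (ih (a + 1))
      · exact le_refl _

theorem pvRun_ub (xs : List Char) (i j : Nat) : ∀ k a, 1 ≤ a → pvRun xs i j a k ≤ a + k - 1 := by
  intro k
  induction k with
  | zero => intro a _; simp [pvRun]
  | succ k ih =>
      intro a ha
      rw [pvRun]
      split
      · exact le_trans (ih (a + 1) (by omega)) (by omega)
      · omega

theorem pvRun_iff (xs : List Char) (i j : Nat) :
    ∀ k a, 1 ≤ a → (∀ l, 1 ≤ l → l < a → pvM xs i j l) →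
      ∀ l, 1 ≤ l → l < a + k → (l ≤ pvRun xs i j a k ↔ pvM xs i j l) := by
  intro k
  induction k with
  | zero =>
      intro a ha hctx l hl hla
      rw [pvRun]
      constructor
      · intro h; exact hctx l hl (by omega)
      · intro h
        exact by omega
  | succ k ih =>
      intro a ha hctx l hl hla
      rw [pvRun]
      split
      · rename_i hm
        by_cases hcase : l < a + 1
        · -- l ≤ a: pvM holds (from hctx or hm); lhs: l ≤ pvRun (a+1) k ≥ a
          have hM : pvM xs i j l := by
            rcases Nat.lt_or_ge l a with h' | h'
            · exact hctx l hl h'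
            · have : l = a := by omega
              simpa [this] using hm
          have hlb := pvRun_lb xs i j k (a + 1)
          constructor
          · intro _; exact hM
          · intro _; omega
        · exact ih (a + 1) (by omega)
            (by intro l' h1 h2
                rcases Nat.lt_or_ge l' a with h' | h'
                · exact hctx l' h1 h'
                · have : l' = a := by omega
                  simpa [this] using hm)
            l hl (by omega)
      · rename_i hm
        constructor
        · intro h
          exact hctx l hl (by omega)
        · intro hM
          rcases Nat.lt_or_ge l a with h' | h'
          · omega
          · exact absurd (pvM_mono hM h') hm

def pvMo (xs : List Char) (i o : Nat) : Nat := pvRun xs i (i - o) 1 (min 9 (xs.length - i))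

theorem pvMo_ub (xs : List Char) (i o : Nat) : pvMo xs i o ≤ min 9 (xs.length - i) := by
  have := pvRun_ub xs i (i - o) (min 9 (xs.length - i)) 1 (by omega)
  simpa [pvMo] using this

theorem pvMo_iff (xs : List Char) (i o l : Nat) (h1 : 1 ≤ l) (h2 : l ≤ min 9 (xs.length - i)) :
    l ≤ pvMo xs i o ↔ pvM xs i (i - o) l :=
  pvRun_iff xs i (i - o) (min 9 (xs.length - i)) 1 (by omega) (by omega) l h1 (by omega)


theorem lzA_cond_iff (xs : List Char) (i o l : Nat) (ho : o ≤ i) :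
    (PySem.List.slice xs (some (i : Int)) (some ((i : Int) + (l : Int)))
       = PySem.List.slice xs (some ((i : Int) - (o : Int))) (some ((i : Int) - (o : Int) + (l : Int))))
    ↔ pvM xs i (i - o) l := by
  have h1 : ((i : Int) - (o : Int)) = ((i - o : Nat) : Int) := by omega
  rw [h1, PySem.List.slice_natCast_add, PySem.List.slice_natCast_add]
  unfold pvM
  exact eq_comm

theorem lzA_inner_eq (xs : List Char) (i o : Nat) (ho : o ≤ i) :
    ∀ k a (best : Nat × Nat), 1 ≤ a → a ≤ best.1 + 1 →
      lzA_inner xs i o (List.range' a k) best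
        = if best.1 < pvRun xs i (i - o) a k then (pvRun xs i (i - o) a k, o) else best := by
  intro k
  induction k with
  | zero =>
      intro a best ha hab
      rw [pvRun]
      simp [lzA_inner, List.range']
      intro h
      omega
  | succ k ih =>
      intro a best ha hab
      rw [List.range'_succ, lzA_inner, pvRun]
      by_cases hm : pvM xs i (i - o) a
      · rw [if_pos ((lzA_cond_iff xs i o a ho).mpr hm), if_pos hm]
        by_cases hup : best.1 < a
        · rw [if_pos hup, ih (a + 1) (a, o) (by omega) (by simp)]
          have hlb : a ≤ pvRun xs i (i - o) (a + 1) k := by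
            simpa using pvRun_lb xs i (i - o) k (a + 1)
          by_cases h2 : a < pvRun xs i (i - o) (a + 1) k
          · rw [if_pos h2, if_pos (by omega)]
          · rw [if_neg h2, if_pos (by omega)]
            have : pvRun xs i (i - o) (a + 1) k = a := by omega
            rw [this]
        · rw [if_neg hup, ih (a + 1) best (by omega) (by omega)]
      · rw [if_neg (by rw [lzA_cond_iff xs i o a ho]; exact hm), if_neg hm]
        rw [if_neg (by omega)]

def pvStep (xs : List Char) (i : Nat) (b : Nat × Nat) (o : Nat) : Nat × Nat :=
  if b.1 < pvMo xs i o then (pvMo xs i o, o) else b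

theorem lzA_search_eq_foldl (xs : List Char) (i : Nat) :
    ∀ offs (best : Nat × Nat), (∀ o ∈ offs, o ≤ i) →
      lzA_search xs i offs best = List.foldl (pvStep xs i) best offs := by
  intro offs
  induction offs with
  | nil => intro best _; rfl
  | cons o rest ih =>
      intro best h
      rw [lzA_search, List.foldl_cons,
        lzA_inner_eq xs i o (h o (by simp)) (min 9 (xs.length - i)) 1 best (by omega) (by omega)]
      exact ih _ (fun o' ho' => h o' (by simp [ho']))

def pvBest (xs : List Char) (i r : Nat) : Nat × Nat := List.foldl (pvStep xs i) (0, 0) (List.range' 1 r)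

theorem pvBest_succ (xs : List Char) (i r : Nat) :
    pvBest xs i (r + 1) = pvStep xs i (pvBest xs i r) (r + 1) := by
  unfold pvBest
  rw [List.range'_1_concat, List.foldl_append]
  simp [Nat.add_comm]

theorem pvBest_spec (xs : List Char) (i : Nat) :
    ∀ r, (∀ o, 1 ≤ o → o ≤ r → pvMo xs i o ≤ (pvBest xs i r).1) ∧
      (0 < (pvBest xs i r).1 →
        1 ≤ (pvBest xs i r).2 ∧ (pvBest xs i r).2 ≤ r ∧
        pvMo xs i (pvBest xs i r).2 = (pvBest xs i r).1 ∧
        ∀ o, 1 ≤ o → o < (pvBest xs i r).2 → pvMo xs i o < (pvBest xs i r).1) := by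
  intro r
  induction r with
  | zero =>
      refine ⟨fun o h1 h2 => by omega, fun h => by simp [pvBest, List.range'] at h⟩
  | succ r ih =>
      rw [pvBest_succ]
      unfold pvStep
      by_cases hc : (pvBest xs i r).1 < pvMo xs i (r + 1)
      · rw [if_pos hc]
        refine ⟨fun o h1 h2 => ?_, fun _ => ⟨by omega, by omega, rfl, fun o h1 h2 => ?_⟩⟩
        · simp only
          rcases Nat.lt_or_ge o (r + 1) with h' | h'
          · exact le_trans (ih.1 o h1 (by omega)) (by omega)
          · have : o = r + 1 := by omega
            simp [this]
        · exact lt_of_le_of_lt (ih.1 o h1 (by omega)) hc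
      · rw [if_neg hc]
        refine ⟨fun o h1 h2 => ?_, fun h => ?_⟩
        · rcases Nat.lt_or_ge o (r + 1) with h' | h'
          · exact ih.1 o h1 (by omega)
          · have : o = r + 1 := by omega
            subst this; omega
        · obtain ⟨a1, a2, a3, a4⟩ := ih.2 h
          exact ⟨a1, by omega, a3, a4⟩

theorem rfind_go_spec (s sub : List Char) :
    ∀ j : Nat, (PySem.Chars.rfind.go s sub j = -1 ∧ ∀ t, t ≤ j → ¬ sub <+: s.drop t)
      ∨ (∃ t, t ≤ j ∧ PySem.Chars.rfind.go s sub j = (t : Int) ∧ sub <+: s.drop t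
           ∧ ∀ t', t < t' → t' ≤ j → ¬ sub <+: s.drop t') := by
  intro j
  induction j with
  | zero =>
      by_cases h : sub <+: s
      · right
        refine ⟨0, le_refl 0, ?_, by simpa using h, fun t' h1 h2 => by omega⟩
        simp [PySem.Chars.rfind.go, List.isPrefixOf_iff_prefix, h]
      · left
        constructor
        · simp [PySem.Chars.rfind.go, List.isPrefixOf_iff_prefix, h]
        · intro t ht
          have : t = 0 := by omega
          simpa [this] using h
  | succ j ih =>
      by_cases h : sub <+: s.drop (j + 1)
      · right
        refine ⟨j + 1, le_refl _, ?_, h, fun t' h1 h2 => by omega⟩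
        simp [PySem.Chars.rfind.go, List.isPrefixOf_iff_prefix, h]
      · have hgo : PySem.Chars.rfind.go s sub (j + 1) = PySem.Chars.rfind.go s sub j := by
          simp [PySem.Chars.rfind.go, List.isPrefixOf_iff_prefix, h]
        rcases ih with ⟨h1, h2⟩ | ⟨t, h1, h2, h3, h4⟩
        · left
          refine ⟨by rw [hgo]; exact h1, fun t ht => ?_⟩
          rcases Nat.lt_or_ge t (j + 1) with h' | h'
          · exact h2 t (by omega)
          · have : t = j + 1 := by omega
            simpa [this] using h
        · right
          refine ⟨t, by omega, by rw [hgo]; exact h2, h3, fun t' ha hb => ?_⟩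
          rcases Nat.lt_or_ge t' (j + 1) with h' | h'
          · exact h4 t' ha (by omega)
          · have : t' = j + 1 := by omega
            simpa [this] using h

theorem pat_length (xs : List Char) (i l : Nat) (hil : i + l ≤ xs.length) :
    ((xs.drop i).take l).length = l := by
  simp
  omega

theorem pat_occ_iff (xs : List Char) (i l t : Nat) (hl : 1 ≤ l) (hil : i + l ≤ xs.length) :
    ((xs.drop i).take l <+: (xs.take (i + l - 1)).drop t) ↔ (t < i ∧ pvM xs i t l) := by
  rw [List.drop_take, List.prefix_take_iff, pat_length xs i l hil]
  constructor
  · rintro ⟨hp, hle⟩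
    have ht : t < i := by omega
    refine ⟨ht, ?_⟩
    have := List.prefix_iff_eq_take.mp hp
    rw [pat_length xs i l hil] at this
    exact this.symm
  · rintro ⟨ht, hm⟩
    refine ⟨?_, by omega⟩
    rw [List.prefix_iff_eq_take, pat_length xs i l hil]
    exact hm.symm

theorem rfindFrom_spec (xs : List Char) (i l : Nat) (hl : 1 ≤ l) (hil : i + l ≤ xs.length) :
    (PySem.Chars.rfindFrom xs (PySem.List.slice xs (some (i : Int)) (some ((i : Int) + (l : Int)))) 0 (some ((i : Int) + (l : Int) - 1)) = -1
       ∧ ∀ t, t < i → ¬ pvM xs i t l)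
    ∨ (∃ t, t < i
        ∧ PySem.Chars.rfindFrom xs (PySem.List.slice xs (some (i : Int)) (some ((i : Int) + (l : Int)))) 0 (some ((i : Int) + (l : Int) - 1)) = (t : Int)
        ∧ pvM xs i t l ∧ ∀ t', t < t' → t' < i → ¬ pvM xs i t' l) := by
  rw [PySem.List.slice_natCast_add]
  have he : ((i : Int) + (l : Int) - 1) = ((i + l - 1 : Nat) : Int) := by omega
  have hrw : PySem.Chars.rfindFrom xs ((xs.drop i).take l) 0 (some ((i : Int) + (l : Int) - 1))
      = PySem.Chars.rfind.go (xs.take (i + l - 1)) ((xs.drop i).take l) (i + l - 1) := by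
    rw [he]
    have h1 : ¬ ((xs.length : Int) < ((i + l - 1 : Nat) : Int)) := by omega
    have h2 : ¬ (((i + l - 1 : Nat) : Int) < 0) := by omega
    simp only [PySem.Chars.rfindFrom, PySem.Chars.rfind, if_neg h1, if_neg h2]
    norm_num
    have hlen : min (i + l - 1) xs.length = i + l - 1 := by omega
    rw [hlen, if_neg h2]
    split
    · rename_i hgo; exact hgo.symm
    · rfl
  rw [hrw]
  rcases rfind_go_spec (xs.take (i + l - 1)) ((xs.drop i).take l) (i + l - 1) with ⟨h1, h2⟩ | ⟨t, h1, h2, h3, h4⟩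
  · left
    refine ⟨h1, fun t ht hm => ?_⟩
    exact h2 t (by omega) ((pat_occ_iff xs i l t hl hil).mpr ⟨ht, hm⟩)
  · right
    have := (pat_occ_iff xs i l t hl hil).mp h3
    refine ⟨t, this.1, h2, this.2, fun t' ha hb hm => ?_⟩
    exact h4 t' ha (by omega) ((pat_occ_iff xs i l t' hl hil).mpr ⟨hb, hm⟩)

theorem lzB_try_spec (xs : List Char) (i : Nat) (hi : i < xs.length) :
    ∀ m, m ≤ min 9 (xs.length - i) →
      (lzB_try xs i ((List.range' 1 m).reverse) = none ∧ ∀ l t, 1 ≤ l → l ≤ m → t < i → ¬ pvM xs i t l)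
      ∨ (∃ l t, lzB_try xs i ((List.range' 1 m).reverse) = some (l, i - t)
          ∧ 1 ≤ l ∧ l ≤ m ∧ t < i ∧ pvM xs i t l
          ∧ (∀ l' t', l < l' → l' ≤ m → t' < i → ¬ pvM xs i t' l')
          ∧ (∀ t', t < t' → t' < i → ¬ pvM xs i t' l)) := by
  intro m
  induction m with
  | zero =>
      intro _
      exact Or.inl ⟨rfl, fun l t h1 h2 => by omega⟩
  | succ m ih =>
      intro hm
      have hcons : (List.range' 1 (m + 1)).reverse = (m + 1) :: (List.range' 1 m).reverse := by
        rw [List.range'_1_concat, List.reverse_append]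
        simp [Nat.add_comm]
      rw [hcons, lzB_try]
      rcases rfindFrom_spec xs i (m + 1) (by omega) (by omega) with ⟨h1, h2⟩ | ⟨t, h1, h2, h3, h4⟩
      · rw [h1]
        simp only [ne_eq, not_true_eq_false, if_false]
        rcases ih (by omega) with ⟨r1, r2⟩ | ⟨l, t, r1, r2, r3, r4, r5, r6, r7⟩
        · left
          refine ⟨r1, fun l t ha hb hc => ?_⟩
          rcases Nat.lt_or_ge l (m + 1) with h' | h'
          · exact r2 l t ha (by omega) hc
          · have : l = m + 1 := by omega
            subst this; exact h2 t hc
        · right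
          refine ⟨l, t, r1, r2, by omega, r4, r5, fun l' t' ha hb hc => ?_, r7⟩
          rcases Nat.lt_or_ge l' (m + 1) with h' | h'
          · exact r6 l' t' ha (by omega) hc
          · have : l' = m + 1 := by omega
            subst this; exact h2 t' hc
      · rw [h2]
        have hne : ((t : Int) ≠ -1) := by omega
        simp only [Int.toNat_natCast]
        right
        exact ⟨m + 1, t, rfl, by omega, le_refl _, h1, h3, fun l' t' ha hb hc => by omega, h4⟩

theorem searches_agree (xs : List Char) (i : Nat) (hi : i < xs.length) :
    lzB_try xs i ((List.range' 1 (min 9 (xs.length - i))).reverse)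
      = (if 0 < (lzA_search xs i (List.range' 1 i) (0, 0)).1 then some (lzA_search xs i (List.range' 1 i) (0, 0)) else none) := by
  rw [lzA_search_eq_foldl xs i (List.range' 1 i) (0, 0)
    (fun o ho => by simp only [List.mem_range'] at ho; omega)]
  have hfold : List.foldl (pvStep xs i) (0, 0) (List.range' 1 i) = pvBest xs i i := rfl
  rw [hfold]
  have hspec := pvBest_spec xs i i
  set bst := pvBest xs i i with hbst
  rcases lzB_try_spec xs i hi (min 9 (xs.length - i)) (le_refl _) with ⟨h1, h2⟩ | ⟨l, t, h1, h2, h3, h4, h5, h6, h7⟩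
  · rw [h1]
    rw [if_neg]
    intro hpos
    obtain ⟨a1, a2, a3, a4⟩ := hspec.2 hpos
    have hto : i - bst.2 < i := by omega
    have hm : pvM xs i (i - bst.2) bst.1 := by
      rw [← pvMo_iff xs i bst.2 bst.1 (by omega) (by rw [← a3]; exact pvMo_ub xs i bst.2)]
      omega
    exact h2 bst.1 (i - bst.2) (by omega) (by rw [← a3]; exact pvMo_ub xs i bst.2) hto hm
  · have ho' : 1 ≤ i - t ∧ i - t ≤ i := by omega
    have hit : i - (i - t) = t := by omega
    have hlo : l ≤ pvMo xs i (i - t) := by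
      rw [pvMo_iff xs i (i - t) l h2 h3, hit]; exact h5
    have hpos : 0 < bst.1 := by
      have := hspec.1 (i - t) ho'.1 ho'.2
      omega
    rw [if_pos hpos, h1]
    obtain ⟨a1, a2, a3, a4⟩ := hspec.2 hpos
    have hbub : bst.1 ≤ min 9 (xs.length - i) := by rw [← a3]; exact pvMo_ub xs i bst.2
    have hmstar : pvM xs i (i - bst.2) bst.1 := by
      rw [← pvMo_iff xs i bst.2 bst.1 (by omega) hbub]; omega
    have hl : l = bst.1 := by
      rcases Nat.lt_trichotomy l bst.1 with h' | h' | h'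
      · exact absurd hmstar (h6 bst.1 (i - bst.2) h' hbub (by omega))
      · exact h'
      · have : l ≤ bst.1 := le_trans hlo (hspec.1 (i - t) ho'.1 ho'.2)
        omega
    subst hl
    have hoeq : i - t = bst.2 := by
      rcases Nat.lt_trichotomy (i - t) bst.2 with h' | h' | h'
      · have := a4 (i - t) ho'.1 h'
        have : pvMo xs i (i - t) = bst.1 := by
          have := hspec.1 (i - t) ho'.1 ho'.2
          omega
        omega
      · exact h'
      · -- i - t > bst.2 → i - bst.2 > t, contradiction with h7
        exact absurd hmstar (h7 (i - bst.2) (by omega) (by omega))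
    rw [hoeq]

theorem toChars_ne_nil (n : Int) : PySem.Int.toChars n ≠ [] := by
  unfold PySem.Int.toChars
  split
  · simp
  · have : 0 < (Nat.toDigits 10 n.toNat).length := Nat.length_toDigits_pos
    intro h
    simp [h] at this

theorem lzA_loop_nil (xs : List Char) (fuel i : Nat) (t1 : Bool) (hi : ¬ i < xs.length) :
    lzA_loop xs fuel i t1 [] = [] := by
  cases fuel <;> simp [lzA_loop, hi]

theorem lzA_loop_append (xs : List Char) :
    ∀ fuel i t1 res, lzA_loop xs fuel i t1 res = res ++ lzA_loop xs fuel i t1 [] := by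
  intro fuel
  induction fuel with
  | zero => intro i t1 res; simp [lzA_loop]
  | succ fuel ih =>
      intro i t1 res
      by_cases hi : i < xs.length
      · simp only [lzA_loop, if_pos hi]
        cases t1 with
        | true =>
            simp only [if_pos]
            rw [ih (i + min 9 (xs.length - i)) false (res ++ _),
              ih (i + min 9 (xs.length - i)) false ([] ++ _)]
            simp
        | false =>
            simp only [Bool.false_eq_true, if_false]
            by_cases hb : 0 < (lzA_search xs i (List.range' 1 i) (0, 0)).1
            · simp only [if_pos hb]
              rw [ih (i + (lzA_search xs i (List.range' 1 i) (0, 0)).1) true (res ++ _),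
                ih (i + (lzA_search xs i (List.range' 1 i) (0, 0)).1) true ([] ++ _)]
              simp
            · simp only [if_neg hb]
              rw [ih i true (res ++ _), ih i true ([] ++ _)]
              simp
      · simp only [lzA_loop, if_neg hi]
        simp

theorem lzB_loop_append (xs : List Char) :
    ∀ fuel i lit out, lzB_loop xs fuel i lit out = out ++ lzB_loop xs fuel i lit [] := by
  intro fuel
  induction fuel with
  | zero => intro i lit out; simp [lzB_loop]
  | succ fuel ih =>
      intro i lit out
      by_cases hi : i < xs.length
      · simp only [lzB_loop, if_pos hi]
        cases lit with
        | true =>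
            simp only [if_pos]
            rw [ih (i + min 9 (xs.length - i)) false (out ++ _ ++ _),
              ih (i + min 9 (xs.length - i)) false ([] ++ _ ++ _)]
            simp
        | false =>
            simp only [Bool.false_eq_true, if_false]
            rcases htry : lzB_try xs i ((List.range' 1 (min 9 (xs.length - i))).reverse) with _ | ⟨l, off⟩
            · simp only
              rw [ih i true (out ++ _), ih i true ([] ++ _)]
              simp
            · simp only
              rw [ih (i + l) true (out ++ _ ++ _), ih (i + l) true ([] ++ _ ++ _)]
              simp
      · simp only [lzB_loop, if_neg hi]
        simp

theorem chunks_eq (xs : List Char) :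
    ∀ fuel i t1, lzB_loop xs fuel i t1 [] = (lzA_loop xs fuel i t1 []).flatten := by
  intro fuel
  induction fuel with
  | zero => intro i t1; simp [lzA_loop, lzB_loop]
  | succ fuel ih =>
      intro i t1
      by_cases hi : i < xs.length
      · simp only [lzA_loop, lzB_loop, if_pos hi]
        cases t1 with
        | true =>
            simp only [if_pos]
            rw [lzB_loop_append xs, lzA_loop_append xs, ih (i + min 9 (xs.length - i)) false]
            simp
        | false =>
            simp only [Bool.false_eq_true, if_false]
            rw [searches_agree xs i hi]
            by_cases hb : 0 < (lzA_search xs i (List.range' 1 i) (0, 0)).1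
            · rw [if_pos hb]
              simp only [if_pos hb]
              rcases hbst : lzA_search xs i (List.range' 1 i) (0, 0) with ⟨b1, b2⟩
              rw [hbst] at hb
              simp only
              rw [lzB_loop_append xs, lzA_loop_append xs, ih (i + b1) true]
              simp
            · rw [if_neg hb]
              simp only [if_neg hb]
              rw [lzB_loop_append xs, lzA_loop_append xs, ih i true]
              simp
      · simp only [lzA_loop, lzB_loop, if_neg hi]
        simp

theorem chunk1_ne (xs : List Char) (i : Nat) (hi : i < xs.length) :
    PySem.Int.toChars ((min 9 (xs.length - i) : Nat) : Int)
      ++ PySem.List.slice xs (some (i : Int)) (some ((i : Int) + ((min 9 (xs.length - i) : Nat) : Int))) ≠ ['0'] := by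
  intro heq
  have h1 := List.length_pos_iff.mpr (toChars_ne_nil ((min 9 (xs.length - i) : Nat) : Int))
  have h2 : (PySem.List.slice xs (some (i : Int)) (some ((i : Int) + ((min 9 (xs.length - i) : Nat) : Int)))).length
      = min 9 (xs.length - i) := by
    rw [PySem.List.slice_natCast_add]
    simp only [List.length_take, List.length_drop]
    omega
  have h3 := congrArg List.length heq
  rw [List.length_append, h2] at h3
  simp only [List.length_cons, List.length_nil] at h3
  omega

theorem chunk2_ne (a b : Int) :
    PySem.Int.toChars a ++ PySem.Int.toChars b ≠ ['0'] := by
  intro heq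
  have h1 := List.length_pos_iff.mpr (toChars_ne_nil a)
  have h2 := List.length_pos_iff.mpr (toChars_ne_nil b)
  have := congrArg List.length heq
  simp at this
  omega

theorem lzA_loop_last_aux (xs : List Char) :
    ∀ fuel i t1, 2 * (xs.length - i) + (if t1 then 0 else 1) ≤ fuel → i < xs.length →
      lzA_loop xs fuel i t1 [] ≠ [] ∧ (lzA_loop xs fuel i t1 []).getLast? ≠ some ['0'] := by
  intro fuel
  induction fuel with
  | zero =>
      intro i t1 h hi
      cases t1 <;> simp at h <;> omega
  | succ fuel ih =>
      intro i t1 h hi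
      simp only [lzA_loop, if_pos hi]
      cases t1 with
      | true =>
          simp only [if_pos]
          rw [lzA_loop_append xs]
          by_cases hrest : i + min 9 (xs.length - i) < xs.length
          · obtain ⟨r1, r2⟩ := ih (i + min 9 (xs.length - i)) false (by simp at h ⊢; omega) hrest
            refine ⟨by simp, ?_⟩
            rw [List.getLast?_append_of_ne_nil _ r1]
            exact r2
          · rw [lzA_loop_nil xs fuel _ _ hrest]
            refine ⟨by simp, ?_⟩
            simp only [List.nil_append, List.append_nil]
            intro hc
            exact chunk1_ne xs i hi (by simpa using hc)
      | false =>
          simp only [Bool.false_eq_true, if_false]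
          by_cases hb : 0 < (lzA_search xs i (List.range' 1 i) (0, 0)).1
          · simp only [if_pos hb]
            rw [lzA_loop_append xs]
            by_cases hrest : i + (lzA_search xs i (List.range' 1 i) (0, 0)).1 < xs.length
            · obtain ⟨r1, r2⟩ := ih _ true (by simp at h ⊢; omega) hrest
              refine ⟨by simp, ?_⟩
              rw [List.getLast?_append_of_ne_nil _ r1]
              exact r2
            · rw [lzA_loop_nil xs fuel _ _ hrest]
              refine ⟨by simp, ?_⟩
              simp only [List.nil_append, List.append_nil]
              intro hc
              exact chunk2_ne _ _ (by simpa using hc)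
          · simp only [if_neg hb]
            rw [lzA_loop_append xs]
            obtain ⟨r1, r2⟩ := ih i true (by simp at h ⊢; omega) hi
            refine ⟨by simp, ?_⟩
            rw [List.getLast?_append_of_ne_nil _ r1]
            exact r2

theorem lzA_loop_last (xs : List Char) (fuel i : Nat) (t1 : Bool)
    (h : 2 * (xs.length - i) + (if t1 then 0 else 1) ≤ fuel) (hi : i < xs.length) :
    lzA_loop xs fuel i t1 [] ≠ [] ∧ (lzA_loop xs fuel i t1 []).getLast? ≠ some ['0'] :=
  lzA_loop_last_aux xs fuel i t1 h hi

theorem pyGet_neg_one {α : Type} (ys : List α) (h : ys ≠ []) : PySem.List.pyGet? ys (-1) = ys.getLast? := by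
  have hn : 1 ≤ ys.length := List.length_pos_iff.mpr h
  unfold PySem.List.pyGet? PySem.List.pyIdx?
  rw [if_neg (by omega : ¬ (0:Int) ≤ -1), if_pos (by omega : -(ys.length : Int) ≤ -1)]
  rw [List.getLast?_eq_getElem?]
  simp

theorem lzA_trail_id (xs : List Char) (res : List (List Char)) (h : res ≠ []) (h0 : res.getLast? ≠ some ['0']) :
    lzA_trail xs res = some res := by
  unfold lzA_trail
  rw [pyGet_neg_one res h]
  rcases hl : res.getLast? with _ | last
  · exact absurd (List.getLast?_eq_none_iff.mp hl) h
  · simp only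
    rw [if_neg (by rw [hl] at h0; intro hc; exact h0 (by rw [hc]))]

-- ===== VERDICT (by name: the statement is the Claim_ definition above) =====
theorem lz_compress_spec : Claim_equal_lz_compress := by
  intro s _ hpre
  unfold Spec_lz_compress lz_compress lz_compress_alt
  have hxs : s.toList ≠ [] := fun h => hpre (String.toList_eq_nil_iff.mp h)
  have hlen : 0 < s.toList.length := List.length_pos_iff.mpr hxs
  have hlast := lzA_loop_last s.toList (2 * s.toList.length + 1) 0 true (by simp) hlen
  rw [lzA_trail_id s.toList _ hlast.1 hlast.2, chunks_eq]
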